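-- pv_equiv track=rewrite | github.com/AlexTuisov/HW3 | HW3_submission/66_submission/hw3.py | result
-- ===== SOURCE A (Python) =====
-- import copy
--
-- def find_healthy_sick_and_quarantine_locations(state_map):
--     sick = []
--     healthy = []
--     quarantine = []
--     for i in range(len(state_map)):
--         for j in range(len(state_map[i])):
--             if state_map[i][j] == 'S':
--                 sick.append((i, j))
--             elif state_map[i][j] == 'H':
--                 healthy.append((i, j))
--             elif state_map[i][j] == 'Q':
--                 quarantine.append((i, j))
--     return healthy, sick, quarantine
--
-- def find_healthy_with_sick_neighbors(healthy, sick):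
--     temp = []
--     for healthy_spot in healthy:
--         for sick_spot in sick:
--             if (abs(healthy_spot[0]-sick_spot[0]) == 1 and abs(healthy_spot[1]-sick_spot[1]) == 0) \
--                     or (abs(healthy_spot[0]-sick_spot[0]) == 0 and abs(healthy_spot[1]-sick_spot[1]) == 1):
--                 temp.append(healthy_spot)
--     return list(set(temp))
--
-- def result(state, action, dynamic_dict, new_q, order):
--     """Return the state that results from executing the given
--     action in the given state. The action must be one of
--     self.actions(state).
--     if order = 1 , it means we are looking for the action of player 1, and if 2 so player 2 action + dynamics
--     """
--     # new_state = copy.deepcopy(state)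
--     new_state = copy.deepcopy(state)
--     new_q0_player_1 = new_q.copy()
--
--     for act in action:
--         if act[0] == "quarantine":
--             new_state[act[1][0]][act[1][1]] = "Q"  # change S to Q
--             new_q0_player_1.append((act[1][0], act[1][1]))
--         elif act[0] == "vaccinate":
--             new_state[act[1][0]][act[1][1]] = "I"  # change H to I
--
--     if order == 2:  # dynamic implementation
--         healthy, sick, quarantine = find_healthy_sick_and_quarantine_locations(new_state)
--         h2s = find_healthy_with_sick_neighbors(healthy, sick)
--         for loc in h2s:  # change H to S
--             new_state[loc[0]][loc[1]] = "S"
--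
--         for q_loc in dynamic_dict['q1']:  # change Q to H
--             new_state[q_loc[0]][q_loc[1]] = "H"
--
--         for s_loc in dynamic_dict['s2']:  # change S to H
--             if s_loc not in new_q0_player_1:
--                 new_state[s_loc[0]][s_loc[1]] = "H"
--
--     return new_state, new_q0_player_1
-- ===== SOURCE B (Python) =====
-- def result(state, action, dynamic_dict, new_q, order):
--     """Return the state that results from executing the given
--     action in the given state (order==2 additionally applies the dynamics)."""
--     new_state = [row[:] for row in state]
--     new_q0_player_1 = list(new_q)
--
--     for name, (i, j) in action:
--         if name == "quarantine":
--             new_state[i][j] = "Q"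
--             new_q0_player_1.append((i, j))
--         elif name == "vaccinate":
--             new_state[i][j] = "I"
--
--     if order == 2:
--         # infection: rebuild the grid cell by cell, turning an 'H' into 'S'
--         # exactly when one of its four orthogonal neighbors is 'S'
--         new_state = [
--             ["S" if cell == "H" and any(
--                 0 <= i + di < len(new_state)
--                 and 0 <= j + dj < len(new_state[i + di])
--                 and new_state[i + di][j + dj] == "S"
--                 for di, dj in ((-1, 0), (1, 0), (0, -1), (0, 1))) else cell
--              for j, cell in enumerate(row)]
--             for i, row in enumerate(new_state)]
--
--         for qi, qj in dynamic_dict['q1']: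
--             new_state[qi][qj] = "H"
--
--         q_set = set(new_q0_player_1)
--         for s_loc in dynamic_dict['s2']:
--             if s_loc not in q_set:
--                 new_state[s_loc[0]][s_loc[1]] = "H"
--
--     return new_state, new_q0_player_1
-- ===== Notes on version B (the rewrite author's own statement) =====
-- stated objective: faster
-- what changed: The infection step no longer collects healthy/sick coordinate lists and compares every healthy cell against every sick cell (then dedups through a set): B rebuilds the grid in one per-cell pass, turning an 'H' into 'S' exactly when one of its four orthogonal neighbors is 'S', and the s2-restore membership test uses a set built once instead of scanning the new_q list per location.
import Mathlib
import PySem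

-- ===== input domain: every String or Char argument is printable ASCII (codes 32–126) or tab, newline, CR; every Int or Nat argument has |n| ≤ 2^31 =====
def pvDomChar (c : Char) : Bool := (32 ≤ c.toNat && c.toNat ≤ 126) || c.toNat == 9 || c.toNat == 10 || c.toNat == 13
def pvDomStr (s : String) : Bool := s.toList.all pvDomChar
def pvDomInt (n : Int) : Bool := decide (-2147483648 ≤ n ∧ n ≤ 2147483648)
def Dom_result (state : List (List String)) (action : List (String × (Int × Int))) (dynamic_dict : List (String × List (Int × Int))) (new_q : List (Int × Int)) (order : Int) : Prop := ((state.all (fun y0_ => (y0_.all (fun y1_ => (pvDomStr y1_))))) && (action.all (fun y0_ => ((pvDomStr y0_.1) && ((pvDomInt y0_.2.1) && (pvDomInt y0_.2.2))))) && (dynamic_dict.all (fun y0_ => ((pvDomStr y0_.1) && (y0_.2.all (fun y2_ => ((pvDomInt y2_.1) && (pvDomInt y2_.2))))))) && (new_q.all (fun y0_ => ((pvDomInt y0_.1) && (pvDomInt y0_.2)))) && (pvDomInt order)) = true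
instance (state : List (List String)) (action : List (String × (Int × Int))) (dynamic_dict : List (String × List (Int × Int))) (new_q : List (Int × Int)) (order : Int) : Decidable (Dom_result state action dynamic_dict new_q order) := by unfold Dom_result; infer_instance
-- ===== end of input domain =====

-- B replaces the all-pairs healthy×sick scan + set-dedup of the infection step by a single per-cell
-- rebuild of the grid checking the four orthogonal neighbors (and a set for the new_q membership test).


-- ===== PORT A =====
-- Python's `m[i][j] = v` on a list of lists (negative indices wrap; Pre_ keeps the index in range,
-- so the total pySetD/pyGetD forms are exact here).  Shared primitive, used by both ports.
def pySetCell (m : List (List String)) (i j : Int) (v : String) : List (List String) :=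
  PySem.List.pySetD m i (PySem.List.pySetD (PySem.List.pyGetD m i []) j v)

-- find_healthy_sick_and_quarantine_locations
def fhsq (m : List (List String)) : List (Int × Int) × List (Int × Int) × List (Int × Int) :=
  (PySem.List.pyRange 0 (PySem.List.len m) 1).foldl (fun acc i =>
    let row := PySem.List.pyGetD m i []
    (PySem.List.pyRange 0 (PySem.List.len row) 1).foldl (fun acc j =>
      let c := PySem.List.pyGetD row j ""
      if c == "S" then (acc.1, acc.2.1 ++ [(i, j)], acc.2.2)
      else if c == "H" then (acc.1 ++ [(i, j)], acc.2.1, acc.2.2)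
      else if c == "Q" then (acc.1, acc.2.1, acc.2.2 ++ [(i, j)])
      else acc) acc) ([], [], [])

-- find_healthy_with_sick_neighbors; list(set(temp)) is ported as PySem.Set.ofList
-- (the set's iteration order only feeds writes of one constant, so the result is order-independent)
def fhwsn (healthy sick : List (Int × Int)) : List (Int × Int) :=
  PySem.Set.ofList (healthy.foldl (fun temp h =>
    sick.foldl (fun temp s =>
      if ((h.1 - s.1).natAbs = 1 ∧ (h.2 - s.2).natAbs = 0) ∨
         ((h.1 - s.1).natAbs = 0 ∧ (h.2 - s.2).natAbs = 1) then temp ++ [h] else temp) temp) [])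

def result (state : List (List String)) (action : List (String × (Int × Int))) (dynamic_dict : List (String × List (Int × Int))) (new_q : List (Int × Int)) (order : Int) : List (List String) × (List (Int × Int)) :=
  let st0 := action.foldl (fun (acc : List (List String) × List (Int × Int)) act =>
      if act.1 == "quarantine" then
        (pySetCell acc.1 act.2.1 act.2.2 "Q", acc.2 ++ [(act.2.1, act.2.2)])
      else if act.1 == "vaccinate" then
        (pySetCell acc.1 act.2.1 act.2.2 "I", acc.2)
      else acc) (state, new_q)
  let new_q0 := st0.2
  if order == 2 then
    let hsq := fhsq st0.1
    let h2s := fhwsn hsq.1 hsq.2.1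
    let g1 := h2s.foldl (fun m l => pySetCell m l.1 l.2 "S") st0.1
    let g2 := ((PySem.Dict.ofList dynamic_dict).getD "q1" []).foldl
        (fun m p => pySetCell m p.1 p.2 "H") g1
    let g3 := ((PySem.Dict.ofList dynamic_dict).getD "s2" []).foldl
        (fun m p => if new_q0.contains p then m else pySetCell m p.1 p.2 "H") g2
    (g3, new_q0)
  else (st0.1, new_q0)

-- ===== PORT B =====
-- is new_state[ni][nj] an in-bounds "S" cell? (B checks 0 <= ni < len(...) explicitly)
def sickAt (g : List (List String)) (ni nj : Int) : Bool :=
  decide (0 ≤ ni) && decide (ni < PySem.List.len g) &&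
  decide (0 ≤ nj) && decide (nj < PySem.List.len (PySem.List.pyGetD g ni [])) &&
  (PySem.List.pyGetD (PySem.List.pyGetD g ni []) nj "" == "S")

-- the per-cell infection comprehension
def infectStep (g : List (List String)) : List (List String) :=
  (PySem.List.enumerate g 0).map (fun irow =>
    (PySem.List.enumerate irow.2 0).map (fun jcell =>
      if jcell.2 == "H" &&
         ([((-1 : Int), (0 : Int)), (1, 0), (0, -1), (0, 1)].any fun d =>
           sickAt g (irow.1 + d.1) (jcell.1 + d.2))
      then "S" else jcell.2))

def result_alt (state : List (List String)) (action : List (String × (Int × Int))) (dynamic_dict : List (String × List (Int × Int))) (new_q : List (Int × Int)) (order : Int) : List (List String) × (List (Int × Int)) :=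
  let st0 := action.foldl (fun (acc : List (List String) × List (Int × Int)) act =>
      if act.1 == "quarantine" then
        (pySetCell acc.1 act.2.1 act.2.2 "Q", acc.2 ++ [(act.2.1, act.2.2)])
      else if act.1 == "vaccinate" then
        (pySetCell acc.1 act.2.1 act.2.2 "I", acc.2)
      else acc) (state, new_q)
  let q := st0.2
  if order == 2 then
    let g1 := infectStep st0.1
    let g2 := ((PySem.Dict.ofList dynamic_dict).getD "q1" []).foldl
        (fun m p => pySetCell m p.1 p.2 "H") g1
    let qset := PySem.Set.ofList q
    let g3 := ((PySem.Dict.ofList dynamic_dict).getD "s2" []).foldl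
        (fun m p => if PySem.Set.contains qset p then m else pySetCell m p.1 p.2 "H") g2
    (g3, q)
  else (st0.1, q)

-- ===== PRECONDITION & SPEC =====
-- is p a valid (possibly negative, Python-wrapping) index pair into the grid?
def cellOk (m : List (List String)) (p : Int × Int) : Bool :=
  match PySem.List.pyGet? m p.1 with
  | some row => (PySem.List.pyGet? row p.2).isSome
  | none => false

-- Pre_ excludes exactly the inputs where the Python A raises: an IndexError from a quarantine/vaccinate
-- action or a 'q1'/'s2' location written out of range, or a KeyError when order == 2 and 'q1'/'s2' is missing.
def Pre_result (state : List (List String)) (action : List (String × (Int × Int))) (dynamic_dict : List (String × List (Int × Int))) (new_q : List (Int × Int)) (order : Int) : Prop :=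
  (∀ a ∈ action, (a.1 = "quarantine" ∨ a.1 = "vaccinate") → cellOk state a.2) ∧
  (order = 2 →
    ((PySem.Dict.ofList dynamic_dict).get? "q1").isSome ∧
    ((PySem.Dict.ofList dynamic_dict).get? "s2").isSome ∧
    (∀ p ∈ (PySem.Dict.ofList dynamic_dict).getD "q1" [], cellOk state p) ∧
    (∀ p ∈ (PySem.Dict.ofList dynamic_dict).getD "s2" [],
        p ∈ new_q ∨ p ∈ (action.filter (fun a => a.1 == "quarantine")).map (·.2) ∨
        cellOk state p))
instance (state : List (List String)) (action : List (String × (Int × Int))) (dynamic_dict : List (String × List (Int × Int))) (new_q : List (Int × Int)) (order : Int) : Decidable (Pre_result state action dynamic_dict new_q order) := by unfold Pre_result; infer_instance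

def pvWitness_result : List (List String) × (List (String × (Int × Int))) × (List (String × List (Int × Int))) × (List (Int × Int)) × Int :=
  ([["H", "S"], ["H"]], [("quarantine", (0, 1))], [("q1", []), ("s2", [(1, 0)])], [], 2)

def Spec_result (state : List (List String)) (action : List (String × (Int × Int))) (dynamic_dict : List (String × List (Int × Int))) (new_q : List (Int × Int)) (order : Int) (out : List (List String) × (List (Int × Int))) : Prop := out = result_alt state action dynamic_dict new_q order
instance (state : List (List String)) (action : List (String × (Int × Int))) (dynamic_dict : List (String × List (Int × Int))) (new_q : List (Int × Int)) (order : Int) (out : List (List String) × (List (Int × Int))) : Decidable (Spec_result state action dynamic_dict new_q order out) := by unfold Spec_result; infer_instance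

-- ===== CLAIM (what is proved, stated in full; the proofs are below) =====
def Claim_equal_result : Prop := ∀ (state : List (List String)) (action : List (String × (Int × Int))) (dynamic_dict : List (String × List (Int × Int))) (new_q : List (Int × Int)) (order : Int), Dom_result state action dynamic_dict new_q order → Pre_result state action dynamic_dict new_q order → Spec_result state action dynamic_dict new_q order (result state action dynamic_dict new_q order)

-- ===== LEMMAS AND PROOFS =====

-- p is a valid nonnegative coordinate of g holding value v
def cellIs (g : List (List String)) (v : String) (p : Int × Int) : Prop :=
  0 ≤ p.1 ∧ p.1 < (g.length : Int) ∧ 0 ≤ p.2 ∧ p.2 < ((PySem.List.pyGetD g p.1 []).length : Int) ∧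
  PySem.List.pyGetD (PySem.List.pyGetD g p.1 []) p.2 "" = v

def adjP (h s : Int × Int) : Prop :=
  ((h.1 - s.1).natAbs = 1 ∧ (h.2 - s.2).natAbs = 0) ∨
  ((h.1 - s.1).natAbs = 0 ∧ (h.2 - s.2).natAbs = 1)

theorem sickAt_iff (g : List (List String)) (a b : Int) :
    sickAt g a b = true ↔ cellIs g "S" (a, b) := by
  simp [sickAt, cellIs, PySem.List.len_eq, and_assoc]

theorem fhsq_inner (row : List String) (i : Int) (js : List Int)
    (acc : List (Int × Int) × List (Int × Int) × List (Int × Int)) :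
    js.foldl (fun acc j =>
      let c := PySem.List.pyGetD row j ""
      if c == "S" then (acc.1, acc.2.1 ++ [(i, j)], acc.2.2)
      else if c == "H" then (acc.1 ++ [(i, j)], acc.2.1, acc.2.2)
      else if c == "Q" then (acc.1, acc.2.1, acc.2.2 ++ [(i, j)])
      else acc) acc
    = (acc.1 ++ (js.filter (fun j => PySem.List.pyGetD row j "" == "H")).map (fun j => (i, j)),
       acc.2.1 ++ (js.filter (fun j => PySem.List.pyGetD row j "" == "S")).map (fun j => (i, j)),
       acc.2.2 ++ (js.filter (fun j => PySem.List.pyGetD row j "" == "Q")).map (fun j => (i, j))) := by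
  induction js generalizing acc with
  | nil => simp
  | cons j js ih =>
    simp only [List.foldl_cons, List.filter_cons]
    rw [ih]
    by_cases hS : PySem.List.pyGetD row j "" = "S"
    · simp [hS, List.append_assoc]
    · by_cases hH : PySem.List.pyGetD row j "" = "H"
      · simp [hH, List.append_assoc]
      · by_cases hQ : PySem.List.pyGetD row j "" = "Q"
        · simp [hQ, List.append_assoc]
        · simp [hS, hH, hQ]

def selOf (g : List (List String)) (v : String) : List (Int × Int) :=
  (PySem.List.pyRange 0 (PySem.List.len g) 1).flatMap (fun i =>
    ((PySem.List.pyRange 0 (PySem.List.len (PySem.List.pyGetD g i [])) 1).filter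
      (fun j => PySem.List.pyGetD (PySem.List.pyGetD g i []) j "" == v)).map (fun j => (i, j)))

theorem fhsq_eq (g : List (List String)) :
    fhsq g = (selOf g "H", selOf g "S", selOf g "Q") := by
  unfold fhsq selOf
  generalize PySem.List.pyRange 0 (PySem.List.len g) 1 = is
  suffices h : ∀ (acc : List (Int × Int) × List (Int × Int) × List (Int × Int)),
      is.foldl (fun acc i =>
        let row := PySem.List.pyGetD g i []
        (PySem.List.pyRange 0 (PySem.List.len row) 1).foldl (fun acc j =>
          let c := PySem.List.pyGetD row j ""
          if c == "S" then (acc.1, acc.2.1 ++ [(i, j)], acc.2.2)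
          else if c == "H" then (acc.1 ++ [(i, j)], acc.2.1, acc.2.2)
          else if c == "Q" then (acc.1, acc.2.1, acc.2.2 ++ [(i, j)])
          else acc) acc) acc
      = (acc.1 ++ is.flatMap (fun i => ((PySem.List.pyRange 0 (PySem.List.len (PySem.List.pyGetD g i [])) 1).filter
            (fun j => PySem.List.pyGetD (PySem.List.pyGetD g i []) j "" == "H")).map (fun j => (i, j))),
         acc.2.1 ++ is.flatMap (fun i => ((PySem.List.pyRange 0 (PySem.List.len (PySem.List.pyGetD g i [])) 1).filter
            (fun j => PySem.List.pyGetD (PySem.List.pyGetD g i []) j "" == "S")).map (fun j => (i, j))),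
         acc.2.2 ++ is.flatMap (fun i => ((PySem.List.pyRange 0 (PySem.List.len (PySem.List.pyGetD g i [])) 1).filter
            (fun j => PySem.List.pyGetD (PySem.List.pyGetD g i []) j "" == "Q")).map (fun j => (i, j)))) by
    simpa using h ([], [], [])
  induction is with
  | nil => intro acc; simp
  | cons i is ih =>
    intro acc
    simp only [List.foldl_cons, List.flatMap_cons]
    rw [fhsq_inner, ih]
    simp [List.append_assoc]

theorem mem_selOf (g : List (List String)) (v : String) (p : Int × Int) :
    p ∈ selOf g v ↔ cellIs g v p := by
  unfold selOf cellIs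
  simp only [List.mem_flatMap, List.mem_map, List.mem_filter, PySem.List.mem_pyRange_one,
    PySem.List.len_eq, beq_iff_eq]
  constructor
  · rintro ⟨i, hi, j, ⟨hj, hv⟩, rfl⟩
    exact ⟨hi.1, hi.2, hj.1, hj.2, hv⟩
  · rintro ⟨h1, h2, h3, h4, h5⟩
    exact ⟨p.1, ⟨h1, h2⟩, p.2, ⟨⟨h3, h4⟩, h5⟩, rfl⟩

theorem mem_temp (healthy sick : List (Int × Int)) (p : Int × Int) :
    p ∈ healthy.foldl (fun temp h =>
      sick.foldl (fun temp s =>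
        if ((h.1 - s.1).natAbs = 1 ∧ (h.2 - s.2).natAbs = 0) ∨
           ((h.1 - s.1).natAbs = 0 ∧ (h.2 - s.2).natAbs = 1) then temp ++ [h] else temp) temp) []
    ↔ p ∈ healthy ∧ ∃ s ∈ sick, adjP p s := by
  have inner : ∀ (h : Int × Int) (t : List (Int × Int)),
      p ∈ sick.foldl (fun temp s =>
        if ((h.1 - s.1).natAbs = 1 ∧ (h.2 - s.2).natAbs = 0) ∨
           ((h.1 - s.1).natAbs = 0 ∧ (h.2 - s.2).natAbs = 1) then temp ++ [h] else temp) t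
      ↔ p ∈ t ∨ (p = h ∧ ∃ s ∈ sick, adjP h s) := by
    intro h t
    induction sick generalizing t with
    | nil => simp
    | cons s ss ih =>
      simp only [List.foldl_cons]
      by_cases hadj : ((h.1 - s.1).natAbs = 1 ∧ (h.2 - s.2).natAbs = 0) ∨
          ((h.1 - s.1).natAbs = 0 ∧ (h.2 - s.2).natAbs = 1)
      · rw [if_pos hadj, ih]
        unfold adjP
        simp only [List.mem_append, List.mem_cons, List.not_mem_nil, or_false]
        constructor
        · rintro ((hp | rfl) | ⟨rfl, s', hs', ha⟩)
          · exact Or.inl hp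
          · exact Or.inr ⟨rfl, s, Or.inl rfl, hadj⟩
          · exact Or.inr ⟨rfl, s', Or.inr hs', ha⟩
        · rintro (hp | ⟨rfl, s', hs' | hs', ha⟩)
          · exact Or.inl (Or.inl hp)
          · exact Or.inl (Or.inr rfl)
          · exact Or.inr ⟨rfl, s', hs', ha⟩
      · rw [if_neg hadj, ih]
        unfold adjP
        simp only [List.mem_cons]
        constructor
        · rintro (hp | ⟨rfl, s', hs', ha⟩)
          · exact Or.inl hp
          · exact Or.inr ⟨rfl, s', Or.inr hs', ha⟩
        · rintro (hp | ⟨rfl, s', hs' | hs', ha⟩)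
          · exact Or.inl hp
          · exact absurd ha (by subst hs'; exact hadj)
          · exact Or.inr ⟨rfl, s', hs', ha⟩
  have outer : ∀ (t : List (Int × Int)),
      p ∈ healthy.foldl (fun temp h =>
        sick.foldl (fun temp s =>
          if ((h.1 - s.1).natAbs = 1 ∧ (h.2 - s.2).natAbs = 0) ∨
             ((h.1 - s.1).natAbs = 0 ∧ (h.2 - s.2).natAbs = 1) then temp ++ [h] else temp) temp) t
      ↔ p ∈ t ∨ (p ∈ healthy ∧ ∃ s ∈ sick, adjP p s) := by
    intro t
    induction healthy generalizing t with
    | nil => simp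
    | cons h hs ih =>
      simp only [List.foldl_cons, List.mem_cons]
      rw [ih, inner]
      constructor
      · rintro ((hp | ⟨rfl, hx⟩) | hrest)
        · exact Or.inl hp
        · exact Or.inr ⟨Or.inl rfl, hx⟩
        · exact Or.inr ⟨Or.inr hrest.1, hrest.2⟩
      · rintro (hp | ⟨rfl | hmem, hx⟩)
        · exact Or.inl (Or.inl hp)
        · exact Or.inl (Or.inr ⟨rfl, hx⟩)
        · exact Or.inr ⟨hmem, hx⟩
  simpa using outer []

theorem mem_fhwsn (g : List (List String)) (p : Int × Int) :
    p ∈ fhwsn (fhsq g).1 (fhsq g).2.1 ↔ cellIs g "H" p ∧ ∃ s, cellIs g "S" s ∧ adjP p s := by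
  unfold fhwsn
  rw [PySem.Set.mem_ofList, mem_temp, fhsq_eq]
  simp [mem_selOf]

theorem getD_set_eq (l : List String) (n m : Nat) (x : String) (d : String) :
    (l.set n x).getD m d = if m = n ∧ n < l.length then x else l.getD m d := by
  rcases Nat.lt_or_ge m l.length with h | h
  · by_cases hmn : m = n
    · subst hmn
      by_cases hn : m < l.length
      · simp [List.getD_eq_getElem, hn, List.getElem_set_self]
      · omega
    · simp [List.getD_eq_getElem, h, List.getElem_set_ne (by omega : n ≠ m), hmn]
  · have h1 : (l.set n x).length ≤ m := by simpa using h
    have hmn : ¬ (m = n ∧ n < l.length) := by omega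
    simp [List.getD_eq_default, h, hmn]

theorem getD_set_row (l : List (List String)) (n m : Nat) (x : List String) :
    (l.set n x).getD m [] = if m = n ∧ n < l.length then x else l.getD m [] := by
  rcases Nat.lt_or_ge m l.length with h | h
  · by_cases hmn : m = n
    · subst hmn
      by_cases hn : m < l.length
      · simp [List.getD_eq_getElem, hn, List.getElem_set_self]
      · omega
    · simp [List.getD_eq_getElem, h, List.getElem_set_ne (by omega : n ≠ m), hmn]
  · have h1 : (l.set n x).length ≤ m := by simpa using h
    have hmn : ¬ (m = n ∧ n < l.length) := by omega
    simp [List.getD_eq_default, h, hmn]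

theorem set_fold (L : List (Int × Int)) (g : List (List String))
    (hL : ∀ p ∈ L, 0 ≤ p.1 ∧ p.1 < (g.length : Int) ∧ 0 ≤ p.2 ∧
          p.2 < ((g.getD p.1.toNat []).length : Int)) :
    (L.foldl (fun m l => pySetCell m l.1 l.2 "S") g).length = g.length ∧
    (∀ i : Nat, ((L.foldl (fun m l => pySetCell m l.1 l.2 "S") g).getD i []).length = (g.getD i []).length) ∧
    (∀ i j : Nat, ((L.foldl (fun m l => pySetCell m l.1 l.2 "S") g).getD i []).getD j "" =
        if ((i : Int), (j : Int)) ∈ L then "S" else (g.getD i []).getD j "") := by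
  induction L generalizing g with
  | nil => simp
  | cons p L ih =>
    obtain ⟨hp1, hp2, hp3, hp4⟩ := hL p List.mem_cons_self
    have hset : pySetCell g p.1 p.2 "S" =
        g.set p.1.toNat ((g.getD p.1.toNat []).set p.2.toNat "S") := by
      rw [pySetCell, PySem.List.pySetD_of_nonneg _ _ hp3, PySem.List.pySetD_of_nonneg _ _ hp1,
        PySem.List.pyGetD_of_nonneg _ _ hp1]
    have hlen : (pySetCell g p.1 p.2 "S").length = g.length := by rw [hset]; simp
    have hrowlen : ∀ i : Nat, ((pySetCell g p.1 p.2 "S").getD i []).length = (g.getD i []).length := by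
      intro i
      rw [hset, getD_set_row]
      split
      · rename_i hc; rw [hc.1]; simp
      · rfl
    have hcell : ∀ i j : Nat, ((pySetCell g p.1 p.2 "S").getD i []).getD j "" =
        if ((i : Int), (j : Int)) = p then "S" else (g.getD i []).getD j "" := by
      intro i j
      rw [hset, getD_set_row]
      by_cases hc : i = p.1.toNat ∧ p.1.toNat < g.length
      · obtain ⟨hc1, hc2⟩ := hc
        subst hc1
        rw [if_pos ⟨rfl, hc2⟩, getD_set_eq]
        by_cases hj : j = p.2.toNat ∧ p.2.toNat < (g.getD p.1.toNat []).length
        · obtain ⟨hj1, hj2⟩ := hj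
          subst hj1
          rw [if_pos ⟨rfl, hj2⟩, if_pos]
          rw [Prod.ext_iff]
          exact ⟨by simpa using Int.toNat_of_nonneg hp1, by simpa using Int.toNat_of_nonneg hp3⟩
        · rw [if_neg hj, if_neg]
          intro he
          rw [Prod.ext_iff] at he
          obtain ⟨h1, h2⟩ := he
          simp only [] at h1 h2
          omega
      · rw [if_neg hc, if_neg]
        intro he
        rw [Prod.ext_iff] at he
        obtain ⟨h1, -⟩ := he
        simp only [] at h1
        omega
    have hL' : ∀ q ∈ L, 0 ≤ q.1 ∧ q.1 < ((pySetCell g p.1 p.2 "S").length : Int) ∧ 0 ≤ q.2 ∧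
        q.2 < (((pySetCell g p.1 p.2 "S").getD q.1.toNat []).length : Int) := by
      intro q hq
      obtain ⟨a1, a2, a3, a4⟩ := hL q (List.mem_cons_of_mem _ hq)
      rw [hlen, hrowlen]
      exact ⟨a1, a2, a3, a4⟩
    obtain ⟨e1, e2, e3⟩ := ih (pySetCell g p.1 p.2 "S") hL'
    refine ⟨?_, ?_, ?_⟩
    · rw [List.foldl_cons, e1, hlen]
    · intro i; rw [List.foldl_cons, e2 i, hrowlen i]
    · intro i j
      rw [List.foldl_cons, e3 i j, hcell i j]
      by_cases hmem : ((i : Int), (j : Int)) ∈ L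
      · simp [hmem]
      · by_cases hep : ((i : Int), (j : Int)) = p <;> simp [hmem, hep]

theorem infectStep_len (g : List (List String)) : (infectStep g).length = g.length := by
  simp [infectStep, PySem.List.length_enumerate]

theorem infectStep_getD (g : List (List String)) (i : Nat) (hi : i < g.length) :
    (infectStep g).getD i [] =
      (PySem.List.enumerate (g.getD i []) 0).map (fun jcell =>
        if jcell.2 == "H" &&
           ([((-1 : Int), (0 : Int)), (1, 0), (0, -1), (0, 1)].any fun d =>
             sickAt g ((i : Int) + d.1) (jcell.1 + d.2))
        then "S" else jcell.2) := by
  have hi' : i < (PySem.List.enumerate g 0).length := by rw [PySem.List.length_enumerate]; exact hi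
  rw [infectStep, List.getD_eq_getElem _ _ (by simpa using hi), List.getElem_map,
    PySem.List.getElem_enumerate g 0 i hi', List.getD_eq_getElem _ _ hi]
  simp only [zero_add]

theorem infectStep_rowlen (g : List (List String)) (i : Nat) :
    ((infectStep g).getD i []).length = (g.getD i []).length := by
  by_cases hi : i < g.length
  · rw [infectStep_getD g i hi]
    simp [PySem.List.length_enumerate]
  · have h1 : (infectStep g).length ≤ i := by rw [infectStep_len]; omega
    have h2 : g.length ≤ i := by omega
    rw [List.getD_eq_default _ _ h1, List.getD_eq_default _ _ h2]

theorem infectStep_cell (g : List (List String)) (i j : Nat) (hi : i < g.length)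
    (hj : j < (g.getD i []).length) :
    ((infectStep g).getD i []).getD j "" =
      if ((g.getD i []).getD j "" == "H" &&
          ([((-1 : Int), (0 : Int)), (1, 0), (0, -1), (0, 1)].any fun d =>
            sickAt g ((i : Int) + d.1) ((j : Int) + d.2))) then "S"
      else (g.getD i []).getD j "" := by
  rw [infectStep_getD g i hi]
  have hj' : j < (PySem.List.enumerate (g.getD i []) 0).length := by
    rw [PySem.List.length_enumerate]; exact hj
  rw [List.getD_eq_getElem _ _ (by simpa using hj), List.getElem_map,
    PySem.List.getElem_enumerate _ 0 j hj']
  have hx : j < (g[i]?.getD []).length := by simpa [List.getD_eq_getElem?_getD] using hj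
  simp [List.getD_eq_getElem?_getD, hx]

theorem cellIs_getD (g : List (List String)) (v : String) (i j : Nat) :
    cellIs g v ((i : Int), (j : Int)) ↔
      i < g.length ∧ j < (g.getD i []).length ∧ (g.getD i []).getD j "" = v := by
  unfold cellIs
  simp only [PySem.List.pyGetD_natCast]
  constructor
  · rintro ⟨_, h2, _, h4, h5⟩
    exact ⟨by omega, by omega, h5⟩
  · rintro ⟨h1, h2, h3⟩
    exact ⟨by omega, by omega, by omega, by omega, h3⟩

theorem infect_eq (g : List (List String)) :
    (fhwsn (fhsq g).1 (fhsq g).2.1).foldl (fun m l => pySetCell m l.1 l.2 "S") g = infectStep g := by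
  have hL : ∀ p ∈ fhwsn (fhsq g).1 (fhsq g).2.1, 0 ≤ p.1 ∧ p.1 < (g.length : Int) ∧ 0 ≤ p.2 ∧
      p.2 < ((g.getD p.1.toNat []).length : Int) := by
    intro p hp
    obtain ⟨hH, -⟩ := (mem_fhwsn g p).mp hp
    obtain ⟨h1, h2, h3, h4, -⟩ := hH
    refine ⟨h1, h2, h3, ?_⟩
    rwa [PySem.List.pyGetD_of_nonneg _ _ h1] at h4
  obtain ⟨e1, e2, e3⟩ := set_fold _ g hL
  apply List.ext_getElem (by rw [e1, infectStep_len])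
  intro i hi1 hi2
  have hig : i < g.length := by rwa [e1] at hi1
  apply List.ext_getElem
  · rw [← List.getD_eq_getElem _ ([] : List String) hi1, ← List.getD_eq_getElem _ ([] : List String) hi2,
      e2 i, infectStep_rowlen]
  intro j hj1 hj2
  have hjg : j < (g.getD i []).length := by
    rw [← List.getD_eq_getElem _ ([] : List String) hi1, e2 i] at hj1
    exact hj1
  have lhs1 : (((fhwsn (fhsq g).1 (fhsq g).2.1).foldl (fun m l => pySetCell m l.1 l.2 "S") g)[i]'hi1)[j]'hj1 =
      (((fhwsn (fhsq g).1 (fhsq g).2.1).foldl (fun m l => pySetCell m l.1 l.2 "S") g).getD i []).getD j "" := by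
    rw [List.getD_eq_getElem _ ([] : List String) hi1]
    rw [List.getD_eq_getElem _ ("" : String) hj1]
  have rhs1 : ((infectStep g)[i]'hi2)[j]'hj2 = ((infectStep g).getD i []).getD j "" := by
    rw [List.getD_eq_getElem _ ([] : List String) hi2]
    rw [List.getD_eq_getElem _ ("" : String) hj2]
  rw [lhs1, rhs1, e3 i j, infectStep_cell g i j hig hjg]
  have hcond : (((i : Int), (j : Int)) ∈ fhwsn (fhsq g).1 (fhsq g).2.1) ↔
      ((g.getD i []).getD j "" == "H" &&
       ([((-1 : Int), (0 : Int)), (1, 0), (0, -1), (0, 1)].any fun d =>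
         sickAt g ((i : Int) + d.1) ((j : Int) + d.2))) = true := by
    rw [mem_fhwsn]
    simp only [List.any_cons, List.any_nil, Bool.and_eq_true, Bool.or_eq_true, beq_iff_eq,
      cellIs_getD, sickAt_iff, Bool.false_eq_true, or_false]
    constructor
    · rintro ⟨⟨-, -, hv⟩, s, hs, hadj⟩
      refine ⟨hv, ?_⟩
      have hs' : cellIs g "S" (s.1, s.2) := hs
      have ha1 : ((i : Int), (j : Int)).1 = (i : Int) := rfl
      unfold adjP at hadj
      rcases hadj with ⟨ha, hb⟩ | ⟨ha, hb⟩
      · simp only [] at ha hb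
        have hcase : s.1 = (i : Int) - 1 ∨ s.1 = (i : Int) + 1 := by omega
        have e2 : s.2 = (j : Int) := by omega
        rcases hcase with e1 | e1
        · exact Or.inl (by
            rw [show ((i : Int) + (-1)) = s.1 by omega, show ((j : Int) + 0) = s.2 by omega]
            exact hs')
        · exact Or.inr (Or.inl (by
            rw [show ((i : Int) + 1) = s.1 by omega, show ((j : Int) + 0) = s.2 by omega]
            exact hs'))
      · simp only [] at ha hb
        have hcase : s.2 = (j : Int) - 1 ∨ s.2 = (j : Int) + 1 := by omega
        have e1 : s.1 = (i : Int) := by omega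
        rcases hcase with e2 | e2
        · exact Or.inr (Or.inr (Or.inl (by
            rw [show ((i : Int) + 0) = s.1 by omega, show ((j : Int) + (-1)) = s.2 by omega]
            exact hs')))
        · exact Or.inr (Or.inr (Or.inr (by
            rw [show ((i : Int) + 0) = s.1 by omega, show ((j : Int) + 1) = s.2 by omega]
            exact hs')))
    · rintro ⟨hv, hnb⟩
      refine ⟨⟨hig, hjg, hv⟩, ?_⟩
      rcases hnb with h | h | h | h
      · exact ⟨((i : Int) + (-1), (j : Int) + 0), h, Or.inl ⟨by simp, by simp⟩⟩
      · exact ⟨((i : Int) + 1, (j : Int) + 0), h, Or.inl ⟨by simp, by simp⟩⟩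
      · exact ⟨((i : Int) + 0, (j : Int) + (-1)), h, Or.inr ⟨by simp, by simp⟩⟩
      · exact ⟨((i : Int) + 0, (j : Int) + 1), h, Or.inr ⟨by simp, by simp⟩⟩
  rw [if_congr hcond rfl rfl]

theorem s2_fold_eq (q : List (Int × Int)) (s2 : List (Int × Int)) (g : List (List String)) :
    s2.foldl (fun m p => if q.contains p then m else pySetCell m p.1 p.2 "H") g =
    s2.foldl (fun m p => if PySem.Set.contains (PySem.Set.ofList q) p then m else pySetCell m p.1 p.2 "H") g := by
  have hc : ∀ p : Int × Int, q.contains p = PySem.Set.contains (PySem.Set.ofList q) p := by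
    intro p
    simp [PySem.Set.contains_eq_listContains, List.contains_eq_mem, PySem.Set.mem_ofList]
  congr 1
  funext m p
  rw [hc]

-- ===== VERDICT (by name: the statement is the Claim_ definition above) =====
theorem result_spec : Claim_equal_result := by
  intro state action dynamic_dict new_q order _ _
  unfold Spec_result result result_alt
  simp only []
  rw [infect_eq, s2_fold_eq]
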